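-- pv_equiv track=rewrite | github.com/keizman/side-go-server | auth_sdk.py | sort_query_string
-- ===== SOURCE A (Python) =====
-- from typing import Dict, Optional
--
-- def sort_query_string(query_params: Dict[str, list]) -> str:
--     """Sort query parameters alphabetically"""
--     if not query_params:
--         return ""
--
--     sorted_keys = sorted(query_params.keys())
--     pairs = []
--
--     for key in sorted_keys:
--         values = sorted(query_params[key])
--         for value in values:
--             pairs.append(f"{key}={value}")
--
--     return "&".join(pairs)
-- ===== SOURCE B (Python) =====
-- def sort_query_string(query_params):
--     """Sort query parameters alphabetically"""
--     flat = [(key, value) for key, values in query_params.items() for value in values]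
--     flat.sort()
--     return "&".join(f"{key}={value}" for key, value in flat)
-- ===== Notes on version B (the rewrite author's own statement) =====
-- stated objective: simpler
-- what changed: Instead of sorting the keys and then sorting each key's value list inside a nested loop, B flattens the dict once into a single list of (key, value) tuples, sorts that list once (tuple order = key then value, which matches A's key-then-value ordering), and joins; the empty-dict guard disappears since joining an empty list already gives ''.
import Mathlib
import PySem

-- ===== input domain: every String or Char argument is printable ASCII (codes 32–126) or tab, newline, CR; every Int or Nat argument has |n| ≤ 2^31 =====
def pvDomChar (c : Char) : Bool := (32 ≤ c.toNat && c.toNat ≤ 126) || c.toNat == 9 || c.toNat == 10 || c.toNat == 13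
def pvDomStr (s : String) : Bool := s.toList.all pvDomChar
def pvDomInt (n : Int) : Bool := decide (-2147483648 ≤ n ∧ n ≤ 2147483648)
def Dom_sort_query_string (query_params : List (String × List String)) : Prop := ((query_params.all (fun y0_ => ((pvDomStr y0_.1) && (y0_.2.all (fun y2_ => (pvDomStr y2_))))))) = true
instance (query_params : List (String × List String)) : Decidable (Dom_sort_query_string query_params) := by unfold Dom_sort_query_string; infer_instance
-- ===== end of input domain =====

-- B flattens the dict to one list of (key, value) tuples and sorts it once (tuple order = key then value),
-- instead of A's sorted key pass with a second sort per key inside a nested loop: simpler, one guard fewer.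
-- Equivalence is about the RETURN value only (neither program mutates its argument).

-- ===== PORT A =====
-- f"{key}={value}" (shared formatting primitive of both Pythons; exact on any strings)
def pvFmt (key value : String) : String := PySem.Str.join "" [key, "=", value]

def sort_query_string (query_params : List (String × List String)) : String :=
  if query_params = [] then ""
  else
    let sorted_keys := PySem.List.sorted (PySem.Dict.keys ⟨query_params⟩) (fun k => k) false
    let pairs := sorted_keys.foldl (fun pairs key =>
      let values := PySem.List.sorted (PySem.Dict.getD ⟨query_params⟩ key []) (fun v => v) false
      values.foldl (fun pairs value => pairs ++ [pvFmt key value]) pairs) ([] : List String)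
    PySem.Str.join "&" pairs

-- ===== PORT B =====
def sort_query_string_alt (query_params : List (String × List String)) : String :=
  let flat := query_params.flatMap (fun kv => kv.2.map (fun value => (kv.1, value)))
  let flatSorted := PySem.List.sorted2 flat (fun p => p.1) (fun p => p.2) false
  PySem.Str.join "&" (flatSorted.map (fun p => pvFmt p.1 p.2))

-- ===== PRECONDITION & SPEC =====
-- Pre_ excludes association lists with duplicate keys: such a list represents no Python dict (the dict
-- argument of both Pythons has unique keys), and which value a duplicate key denotes is accidental.
def Pre_sort_query_string (query_params : List (String × List String)) : Prop :=
  (query_params.map Prod.fst).Nodup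
instance (query_params : List (String × List String)) : Decidable (Pre_sort_query_string query_params) := by
  unfold Pre_sort_query_string; infer_instance

def pvWitness_sort_query_string : (List (String × List String)) :=
  [("b", ["2", "1"]), ("a", ["x"])]

def Spec_sort_query_string (query_params : List (String × List String)) (out : String) : Prop := out = sort_query_string_alt query_params
instance (query_params : List (String × List String)) (out : String) : Decidable (Spec_sort_query_string query_params out) := by unfold Spec_sort_query_string; infer_instance

-- ===== CLAIM (what is proved, stated in full; the proofs are below) =====
def Claim_equal_sort_query_string : Prop := ∀ (query_params : List (String × List String)), Dom_sort_query_string query_params → Pre_sort_query_string query_params → Spec_sort_query_string query_params (sort_query_string query_params)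

-- ===== LEMMAS AND PROOFS =====

-- 'g' produces for each key a block of pairs with that first component, ascending in the second;
-- strictly ascending keys make the concatenation lexicographically ascending.
theorem pv_pairwise_flatMap (keys : List String) (g : String → List (String × String))
    (hk : keys.Pairwise (· < ·))
    (hval : ∀ k, ((g k).Pairwise (fun a b => a.2 ≤ b.2)))
    (hfst : ∀ k, ∀ p ∈ g k, p.1 = k) :
    (keys.flatMap g).Pairwise (fun a b => toLex a ≤ toLex b) := by
  induction keys with
  | nil => simp
  | cons k ks ih =>
    rw [List.flatMap_cons, List.pairwise_append]
    refine ⟨?_, ih (List.pairwise_cons.1 hk).2, ?_⟩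
    · refine (hval k).imp_of_mem (fun ha hb hle => ?_)
      rw [Prod.Lex.toLex_le_toLex]
      exact Or.inr ⟨(hfst k _ ha).trans (hfst k _ hb).symm, hle⟩
    · intro a ha b hb
      obtain ⟨k', hk', hb'⟩ := List.mem_flatMap.1 hb
      rw [Prod.Lex.toLex_le_toLex]
      refine Or.inl ?_
      rw [hfst k a ha, hfst k' b hb']
      exact (List.pairwise_cons.1 hk).1 k' hk'

-- first-match lookup in an association list with pairwise-distinct keys finds each member's value
theorem pv_getD_of_mem (qp : List (String × List String))
    (hnd : (qp.map Prod.fst).Nodup) (p : String × List String) (hp : p ∈ qp) :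
    PySem.Dict.getD (⟨qp⟩ : PySem.Dict String (List String)) p.1 [] = p.2 := by
  have hget : PySem.Dict.get? (⟨qp⟩ : PySem.Dict String (List String)) p.1 = some p.2 := by
    induction qp with
    | nil => cases hp
    | cons q rest ih =>
      rw [show (⟨q :: rest⟩ : PySem.Dict String (List String)) = ⟨(q.1, q.2) :: rest⟩ by simp,
        PySem.Dict.get?_mk_cons]
      rcases List.mem_cons.1 hp with h | h
      · subst h; simp
      · have hne : ¬ (q.1 == p.1) = true := by
          intro hbe
          have : p.1 ∈ rest.map Prod.fst := List.mem_map.2 ⟨p, h, rfl⟩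
          exact (List.nodup_cons.1 hnd).1 (by rwa [eq_of_beq hbe])
        rw [if_neg hne]
        exact ih (List.nodup_cons.1 hnd).2 h
  simp [PySem.Dict.getD, hget]

-- Python's 2-tuple sort is the sort by the lexicographic key.
theorem sorted2_eq_sorted_lex (xs : List (String × String)) :
    PySem.List.sorted2 xs (fun p => p.1) (fun p => p.2) false
      = PySem.List.sorted xs (fun p => toLex p) false := by
  rw [PySem.List.sorted_eq_foldl_insertBy]
  show xs.foldl (fun acc x => PySem.List.insertBy
      (fun a b => decide (a.1 < b.1) || (!decide (b.1 < a.1) && decide (a.2 < b.2))) x acc) []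
    = xs.foldl (fun acc x => PySem.List.insertBy
      (fun a b => decide (toLex a < toLex b)) x acc) []
  have hfun : ∀ (a b : String × String),
      (decide (a.1 < b.1) || (!decide (b.1 < a.1) && decide (a.2 < b.2)))
        = decide (toLex a < toLex b) := by
    intro a b
    rcases lt_trichotomy a.1 b.1 with h | h | h
    · simp [h, Prod.Lex.toLex_lt_toLex]
    · simp [h, Prod.Lex.toLex_lt_toLex]
    · simp [Prod.Lex.toLex_lt_toLex, h, h.not_gt, h.ne']
  simp only [hfun]

-- A's flattened pair sequence.
def pvFlatA (qp : List (String × List String)) : List (String × String) :=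
  (PySem.List.sorted (PySem.Dict.keys ⟨qp⟩) (fun k => k) false).flatMap
    (fun k => (PySem.List.sorted (PySem.Dict.getD ⟨qp⟩ k []) (fun v => v) false).map (fun v => (k, v)))

-- B's flattened pair sequence.
def pvFlatB (qp : List (String × List String)) : List (String × String) :=
  qp.flatMap (fun kv => kv.2.map (fun value => (kv.1, value)))

theorem portA_eq_join_flatA (qp : List (String × List String)) (h : qp ≠ []) :
    sort_query_string qp = PySem.Str.join "&" ((pvFlatA qp).map (fun p => pvFmt p.1 p.2)) := by
  unfold sort_query_string
  rw [if_neg h]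
  simp only [PySem.List.foldl_append_singleton_eq_map, PySem.List.foldl_append_eq_flatMap,
    List.nil_append]
  unfold pvFlatA
  rw [List.map_flatMap]
  simp only [List.map_map, Function.comp_def]

theorem flatA_pairwise (qp : List (String × List String))
    (hnd : (qp.map Prod.fst).Nodup) :
    (pvFlatA qp).Pairwise (fun a b => toLex a ≤ toLex b) := by
  unfold pvFlatA
  have hkeys : PySem.Dict.keys (⟨qp⟩ : PySem.Dict String (List String)) = qp.map Prod.fst := rfl
  have hndk : (PySem.List.sorted (PySem.Dict.keys ⟨qp⟩) (fun k => k) false).Nodup := by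
    rw [(PySem.List.sorted_perm (PySem.Dict.keys ⟨qp⟩) (fun k => k) false).nodup_iff, hkeys]
    exact hnd
  have hklt : (PySem.List.sorted (PySem.Dict.keys ⟨qp⟩) (fun k => k) false).Pairwise (· < ·) := by
    have hle := PySem.List.sorted_pairwise (PySem.Dict.keys ⟨qp⟩) (fun k => k)
    exact (hle.and hndk).imp (fun hab => lt_of_le_of_ne hab.1 hab.2)
  exact pv_pairwise_flatMap _ _ hklt
    (fun k => by
      have := PySem.List.sorted_pairwise (PySem.Dict.getD (⟨qp⟩ : PySem.Dict String (List String)) k []) (fun v => v)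
      exact List.pairwise_map.2 this)
    (fun k p hp => by
      obtain ⟨v, _, hv⟩ := List.mem_map.1 hp
      exact (congrArg Prod.fst hv).symm)

theorem flatA_perm_flatB (qp : List (String × List String))
    (hnd : (qp.map Prod.fst).Nodup) :
    (pvFlatA qp).Perm (pvFlatB qp) := by
  unfold pvFlatA pvFlatB
  have hkeys : PySem.Dict.keys (⟨qp⟩ : PySem.Dict String (List String)) = qp.map Prod.fst := rfl
  refine List.Perm.trans
    (List.Perm.flatMap (PySem.List.sorted_perm (PySem.Dict.keys ⟨qp⟩) (fun k => k) false)
      (fun a _ => List.Perm.refl _)) ?_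
  rw [hkeys, List.flatMap_map]
  refine List.Perm.flatMap (List.Perm.refl qp) (fun p hp => ?_)
  rw [pv_getD_of_mem qp hnd p hp]
  exact (PySem.List.sorted_perm p.2 (fun v => v) false).map _

theorem flatA_eq_sorted2 (qp : List (String × List String))
    (hnd : (qp.map Prod.fst).Nodup) :
    pvFlatA qp = PySem.List.sorted2 (pvFlatB qp) (fun p => p.1) (fun p => p.2) false := by
  have hperm : (pvFlatA qp).Perm (PySem.List.sorted2 (pvFlatB qp) (fun p => p.1) (fun p => p.2) false) :=
    (flatA_perm_flatB qp hnd).trans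
      (PySem.List.sorted2_perm (pvFlatB qp) (fun p => p.1) (fun p => p.2) false).symm
  refine PySem.List.eq_of_perm_of_pairwise_le_of_injective (fun p => toLex p) ?_ hperm
    (flatA_pairwise qp hnd) ?_
  · intro a b hab; exact toLex.injective hab
  · rw [sorted2_eq_sorted_lex]
    exact PySem.List.sorted_pairwise (pvFlatB qp) (fun p => toLex p)

-- ===== VERDICT (by name: the statement is the Claim_ definition above) =====
theorem sort_query_string_spec : Claim_equal_sort_query_string := by
  intro qp _ hnd
  unfold Spec_sort_query_string
  by_cases h : qp = []
  · subst h; rfl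
  · rw [portA_eq_join_flatA qp h, flatA_eq_sorted2 qp hnd]
    rfl
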